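-- pv_equiv track=rewrite | github.com/tomquirk/linkedin-api | linkedin_api/utils/log.py | get_extra_log_content
-- ===== SOURCE A (Python) =====
-- def get_extra_log_content(content_dict: dict):
--     if not content_dict:
--         return ''
--
--     log = ' with'
--
--     # If more than 2 items, then we need to add comma
--     add_comma = len(content_dict) > 2
--
--     for index, key in enumerate(content_dict):
--         value = content_dict[key]
--
--         # Esacepe new line as it will be printed as a new line
--         if isinstance(value, str) and '\n' in value:
--             value = value.replace('\n', '\\n')
--
--         # If it's the last item while it's not the first item, then add "and"
--         if index != 0 and index == len(content_dict) - 1: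
--             log += f" and {key} {value}"
--         else:
--             log += f" {key} {value}," if add_comma else f" {key} {value}"
--
--     return log
-- ===== SOURCE B (Python) =====
-- def _entry(key, value):
--     if isinstance(value, str):
--         value = value.replace('\n', '\\n')
--     return f"{key} {value}"
--
--
-- def get_extra_log_content(content_dict: dict):
--     if not content_dict:
--         return ''
--     parts = [_entry(key, value) for key, value in content_dict.items()]
--     if len(parts) == 1:
--         return ' with ' + parts[0]
--     if len(parts) == 2:
--         return f' with {parts[0]} and {parts[1]}'
--     return ' with ' + ', '.join(parts[:-1]) + ', and ' + parts[-1]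
-- ===== Notes on version B (the rewrite author's own statement) =====
-- stated objective: simpler
-- what changed: Replaces A's single accumulating loop with enumerate/add_comma/last-index branching by building the list of formatted entries once and assembling the result by length: '' for empty, the entry for one, 'x and y' for two, and ', '.join(init) + ', and ' + last for three or more.
import Mathlib
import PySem

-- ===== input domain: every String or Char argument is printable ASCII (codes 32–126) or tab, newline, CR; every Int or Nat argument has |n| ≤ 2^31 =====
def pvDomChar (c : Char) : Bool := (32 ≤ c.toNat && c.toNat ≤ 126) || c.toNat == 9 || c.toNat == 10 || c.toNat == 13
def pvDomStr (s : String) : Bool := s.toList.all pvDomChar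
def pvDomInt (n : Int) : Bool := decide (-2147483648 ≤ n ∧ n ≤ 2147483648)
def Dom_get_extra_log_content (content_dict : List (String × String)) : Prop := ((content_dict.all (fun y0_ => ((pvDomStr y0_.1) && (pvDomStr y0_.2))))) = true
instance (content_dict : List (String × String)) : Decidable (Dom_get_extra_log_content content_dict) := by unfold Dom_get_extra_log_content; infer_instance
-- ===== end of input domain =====

-- B replaces A's enumerate/add_comma/last-index branching by building the formatted
-- entries once and assembling them by length (slice-join for 3+ items): simpler, same cost.

-- ===== PORT A =====
-- The dict argument is materialised as a PySem.Dict (Python dict semantics: insertion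
-- order, duplicate keys overwrite).  `isinstance(value, str)` is always true on this
-- signature (all values are String).  `content_dict[key]` is `d.getD key ""` — the
-- default is never reached since every iterated key is a key of d (no KeyError).
def get_extra_log_content (content_dict : List (String × String)) : String :=
  let d := PySem.Dict.ofList content_dict
  if d.size = 0 then ""
  else
    let n := d.size
    let add_comma := decide (n > 2)
    (d.keys.foldl (fun (s : String × Nat) (key : String) =>
      let value := d.getD key ""
      let value := if PySem.Str.isIn "\n" value then PySem.Str.replace value "\n" "\\n" else value
      let log :=
        if s.2 ≠ 0 ∧ s.2 = n - 1 then s.1 ++ " and " ++ key ++ " " ++ value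
        else if add_comma then s.1 ++ " " ++ key ++ " " ++ value ++ ","
        else s.1 ++ " " ++ key ++ " " ++ value
      (log, s.2 + 1)) (" with", 0)).1

-- ===== PORT B =====
-- Transliteration of Source B: `_entry`'s isinstance branch is always taken (values are
-- String), so the entry is `key ++ " " ++ value.replace("\n", "\\n")`.
def get_extra_log_content_alt (content_dict : List (String × String)) : String :=
  let d := PySem.Dict.ofList content_dict
  if d.size = 0 then ""
  else
    let parts := d.items.map (fun p => p.1 ++ " " ++ PySem.Str.replace p.2 "\n" "\\n")
    if parts.length = 1 then " with " ++ PySem.List.pyGetD parts 0 ""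
    else if parts.length = 2 then
      " with " ++ PySem.List.pyGetD parts 0 "" ++ " and " ++ PySem.List.pyGetD parts 1 ""
    else
      " with " ++ PySem.Str.join ", " (PySem.List.slice parts none (some (-1)))
        ++ ", and " ++ PySem.List.pyGetD parts (-1) ""

-- ===== PRECONDITION & SPEC =====
def Spec_get_extra_log_content (content_dict : List (String × String)) (out : String) : Prop := out = get_extra_log_content_alt content_dict
instance (content_dict : List (String × String)) (out : String) : Decidable (Spec_get_extra_log_content content_dict out) := by unfold Spec_get_extra_log_content; infer_instance

-- ===== CLAIM (what is proved, stated in full; the proofs are below) =====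
def Claim_equal_get_extra_log_content : Prop := ∀ (content_dict : List (String × String)), Dom_get_extra_log_content content_dict → Spec_get_extra_log_content content_dict (get_extra_log_content content_dict)

-- ===== LEMMAS AND PROOFS =====

-- the formatted entry of one (key, value) pair
def entB (p : String × String) : String := p.1 ++ " " ++ PySem.Str.replace p.2 "\n" "\\n"

-- A's comma-separated prefix: " e0," ++ " e1," ++ …
def commaCat : List (String × String) → String
  | [] => ""
  | p :: t => " " ++ entB p ++ "," ++ commaCat t

-- replace does nothing when the pattern does not occur (single-char pattern '\n')
theorem go_no_nl (fuel : Nat) : ∀ (l acc : List Char), '\n' ∉ l → l.length ≤ fuel →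
    PySem.Chars.replace.go ['\n'] ['\\','n'] fuel l acc = acc.reverse ++ l := by
  induction fuel with
  | zero =>
    intro l acc _ hl
    unfold PySem.Chars.replace.go
    simp at hl
    simp [hl]
  | succ fuel ih =>
    intro l acc hmem hl
    match l with
    | [] => unfold PySem.Chars.replace.go; simp
    | c :: t =>
      have hc : c ≠ '\n' := fun h => hmem (h ▸ List.mem_cons_self)
      unfold PySem.Chars.replace.go
      have hpre : List.isPrefixOf ['\n'] (c :: t) = false := by
        simp [List.isPrefixOf]
        exact fun h => absurd h.symm hc
      simp only [hpre]
      simp only [Bool.false_eq_true, if_false]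
      rw [ih t (c :: acc) (fun h => hmem (List.mem_cons_of_mem _ h)) (by simpa using Nat.le_of_succ_le_succ hl)]
      simp

theorem esc_eq (v : String) :
    (if PySem.Str.isIn "\n" v then PySem.Str.replace v "\n" "\\n" else v)
      = PySem.Str.replace v "\n" "\\n" := by
  split_ifs with h
  · rfl
  · have hmem : '\n' ∉ v.toList := by
      intro hm
      exact h ((PySem.Str.isIn_iff_infix "\n" v).mpr (by
        simpa using (List.singleton_infix_iff '\n' v.toList).mpr hm))
    have hch : PySem.Chars.replace v.toList ['\n'] ['\\','n'] = v.toList := by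
      unfold PySem.Chars.replace
      rw [if_neg (by simp)]
      rw [go_no_nl _ _ _ hmem (le_refl _)]
      simp
    show v = PySem.Str.replace v "\n" "\\n"
    rw [PySem.Str.replace]
    rw [show ("\n" : String).toList = ['\n'] from rfl, show ("\\n" : String).toList = ['\\','n'] from rfl]
    rw [hch]
    exact (String.toList_inj.mp String.toList_ofList).symm

-- A's loop body after substituting the dict lookup and dropping the (always-satisfied)
-- containment guard
def stepP (n : Nat) (s : String × Nat) (p : String × String) : String × Nat :=
  (if s.2 ≠ 0 ∧ s.2 = n - 1 then s.1 ++ " and " ++ entB p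
   else if n > 2 then s.1 ++ " " ++ entB p ++ ","
   else s.1 ++ " " ++ entB p, s.2 + 1)

theorem fold_items (d : PySem.Dict String String) (n : Nat)
    (hget : ∀ p ∈ d.items, d.getD p.1 "" = p.2) :
    ∀ (ps : List (String × String)) (s : String × Nat), (∀ p ∈ ps, p ∈ d.items) →
    (List.map (fun x => x.1) ps).foldl
      (fun (s : String × Nat) (key : String) =>
        (if s.2 ≠ 0 ∧ s.2 = n - 1 then
            s.1 ++ " and " ++ key ++ " " ++
              if PySem.Str.isIn "\n" (d.getD key "") = true then
                PySem.Str.replace (d.getD key "") "\n" "\\n"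
              else d.getD key ""
          else
            if decide (n > 2) = true then
              (s.1 ++ " " ++ key ++ " " ++
                  if PySem.Str.isIn "\n" (d.getD key "") = true then
                    PySem.Str.replace (d.getD key "") "\n" "\\n"
                  else d.getD key "") ++ ","
            else
              s.1 ++ " " ++ key ++ " " ++
                if PySem.Str.isIn "\n" (d.getD key "") = true then
                  PySem.Str.replace (d.getD key "") "\n" "\\n"
                else d.getD key "",
          s.2 + 1)) s
      = ps.foldl (stepP n) s := by
  intro ps
  induction ps with
  | nil => intro s _; rfl
  | cons p t ih =>
    intro s hmem
    simp only [List.map_cons, List.foldl_cons]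
    rw [hget p (hmem p List.mem_cons_self), esc_eq]
    have hstep : ∀ (s : String × Nat),
        ((if s.2 ≠ 0 ∧ s.2 = n - 1 then s.1 ++ " and " ++ p.1 ++ " " ++ PySem.Str.replace p.2 "\n" "\\n"
          else if decide (n > 2) = true then s.1 ++ " " ++ p.1 ++ " " ++ PySem.Str.replace p.2 "\n" "\\n" ++ ","
          else s.1 ++ " " ++ p.1 ++ " " ++ PySem.Str.replace p.2 "\n" "\\n", s.2 + 1) : String × Nat)
          = stepP n s p := by
      intro s
      simp only [stepP, entB, String.append_assoc, decide_eq_true_eq]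
    rw [hstep]
    exact ih _ (fun q hq => hmem q (List.mem_cons_of_mem _ hq))

theorem foldP_concat (n : Nat) (hn : 2 < n) :
    ∀ (qs : List (String × String)) (last : String × String) (acc : String) (i : Nat),
    i + qs.length + 1 = n →
    ((qs ++ [last]).foldl (stepP n) (acc, i)).1 = acc ++ commaCat qs ++ " and " ++ entB last := by
  intro qs
  induction qs with
  | nil =>
    intro last acc i hi
    simp only [List.length_nil] at hi
    have h2 : i = n - 1 := by omega
    have h3 : ¬ n - 1 = 0 := by omega
    simp [stepP, h2, h3, commaCat]
  | cons p t ih =>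
    intro last acc i hi
    have hcond : ¬ (i ≠ 0 ∧ i = n - 1) := by
      simp at hi ⊢
      omega
    simp only [List.cons_append, List.foldl_cons]
    rw [show stepP n (acc, i) p = (acc ++ " " ++ entB p ++ ",", i + 1) from by
      simp [stepP, hcond, hn]]
    rw [ih last _ (i + 1) (by simp at hi ⊢; omega)]
    rw [← String.toList_inj]
    simp [commaCat, String.toList_append]

theorem strJoin_singleton (s a : String) : PySem.Str.join s [a] = a := by
  rw [← String.toList_inj]
  simp [PySem.Str.join, PySem.Chars.join_singleton]

theorem strJoin_cons_cons (s a b : String) (r : List String) :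
    PySem.Str.join s (a :: b :: r) = a ++ s ++ PySem.Str.join s (b :: r) := by
  rw [← String.toList_inj]
  simp [PySem.Str.join, String.toList_append, PySem.Chars.join_cons_cons]

theorem join_comma : ∀ (t : List (String × String)) (x : String × String) (pre : String),
    pre ++ " " ++ entB x ++ "," ++ commaCat t ++ " and "
      = pre ++ " " ++ PySem.Str.join ", " ((x :: t).map entB) ++ ", and " := by
  intro t
  induction t with
  | nil =>
    intro x pre
    rw [List.map_cons, List.map_nil, strJoin_singleton]
    rw [← String.toList_inj]
    simp [commaCat, String.toList_append]
  | cons y t ih =>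
    intro x pre
    rw [List.map_cons, List.map_cons, strJoin_cons_cons, ← List.map_cons]
    have ih2 := ih y (pre ++ " " ++ entB x ++ ",")
    rw [← String.toList_inj] at ih2 ⊢
    simp only [commaCat, String.toList_append] at ih2 ⊢
    simp at ih2 ⊢
    rw [ih2]

theorem fold_keys (d : PySem.Dict String String)
    (hget : ∀ p ∈ d.items, d.getD p.1 "" = p.2) (s : String × Nat) :
    d.keys.foldl
      (fun (s : String × Nat) (key : String) =>
        (if s.2 ≠ 0 ∧ s.2 = d.size - 1 then
            s.1 ++ " and " ++ key ++ " " ++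
              if PySem.Str.isIn "\n" (d.getD key "") = true then
                PySem.Str.replace (d.getD key "") "\n" "\\n"
              else d.getD key ""
          else
            if decide (d.size > 2) = true then
              (s.1 ++ " " ++ key ++ " " ++
                  if PySem.Str.isIn "\n" (d.getD key "") = true then
                    PySem.Str.replace (d.getD key "") "\n" "\\n"
                  else d.getD key "") ++ ","
            else
              s.1 ++ " " ++ key ++ " " ++
                if PySem.Str.isIn "\n" (d.getD key "") = true then
                  PySem.Str.replace (d.getD key "") "\n" "\\n"
                else d.getD key "",
          s.2 + 1)) s
      = d.items.foldl (stepP d.size) s := by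
  rw [show d.keys = List.map (fun x => x.1) d.items from rfl]
  exact fold_items d d.size hget d.items s (fun _ hp => hp)

theorem main_items (d : PySem.Dict String String)
    (hget : ∀ p ∈ d.items, d.getD p.1 "" = p.2) :
    (if d.size = 0 then ""
     else
      (d.keys.foldl
        (fun (s : String × Nat) (key : String) =>
        (if s.2 ≠ 0 ∧ s.2 = d.size - 1 then
            s.1 ++ " and " ++ key ++ " " ++
              if PySem.Str.isIn "\n" (d.getD key "") = true then
                PySem.Str.replace (d.getD key "") "\n" "\\n"
              else d.getD key ""
          else
            if decide (d.size > 2) = true then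
              (s.1 ++ " " ++ key ++ " " ++
                  if PySem.Str.isIn "\n" (d.getD key "") = true then
                    PySem.Str.replace (d.getD key "") "\n" "\\n"
                  else d.getD key "") ++ ","
            else
              s.1 ++ " " ++ key ++ " " ++
                if PySem.Str.isIn "\n" (d.getD key "") = true then
                  PySem.Str.replace (d.getD key "") "\n" "\\n"
                else d.getD key "",
          s.2 + 1)) (" with", 0)).1)
    = (if d.size = 0 then ""
       else
        if (d.items.map (fun p => p.1 ++ " " ++ PySem.Str.replace p.2 "\n" "\\n")).length = 1 then
          " with " ++ PySem.List.pyGetD (d.items.map (fun p => p.1 ++ " " ++ PySem.Str.replace p.2 "\n" "\\n")) 0 ""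
        else if (d.items.map (fun p => p.1 ++ " " ++ PySem.Str.replace p.2 "\n" "\\n")).length = 2 then
          " with " ++ PySem.List.pyGetD (d.items.map (fun p => p.1 ++ " " ++ PySem.Str.replace p.2 "\n" "\\n")) 0 ""
            ++ " and " ++ PySem.List.pyGetD (d.items.map (fun p => p.1 ++ " " ++ PySem.Str.replace p.2 "\n" "\\n")) 1 ""
        else
          " with " ++ PySem.Str.join ", " (PySem.List.slice (d.items.map (fun p => p.1 ++ " " ++ PySem.Str.replace p.2 "\n" "\\n")) none (some (-1)))
            ++ ", and " ++ PySem.List.pyGetD (d.items.map (fun p => p.1 ++ " " ++ PySem.Str.replace p.2 "\n" "\\n")) (-1) "") := by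
  rw [fold_keys d hget]
  obtain ⟨l⟩ := d
  rcases l with _ | ⟨p, _ | ⟨q, _ | ⟨r, t⟩⟩⟩
  · rfl
  · simp [PySem.Dict.size, stepP, entB, PySem.List.pyGetD_zero_cons]
  · simp [PySem.Dict.size, stepP, entB, PySem.List.pyGetD_ofNat']
  · have hne : (q :: r :: t) ≠ [] := by simp
    have hsp : p :: q :: r :: t = (p :: (q :: r :: t).dropLast) ++ [(q :: r :: t).getLast hne] := by
      rw [List.cons_append, List.dropLast_append_getLast]
    rw [hsp]
    rw [foldP_concat]
    case hn => simp [PySem.Dict.size, List.length_dropLast]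
    case a => simp [PySem.Dict.size, List.length_dropLast]
    rw [show (fun p : String × String => p.1 ++ " " ++ PySem.Str.replace p.2 "\n" "\\n") = entB from rfl]
    simp only [PySem.Dict.size, List.length_append, List.length_map, List.length_cons,
      List.length_nil, List.length_dropLast]
    rw [if_neg (by omega), if_neg (by omega), if_neg (by omega), if_neg (by omega)]
    simp only [List.map_append, List.map_cons, List.map_nil]
    rw [PySem.List.slice_to_neg_one, List.dropLast_concat, PySem.List.pyGetD_neg_one_append_singleton]
    have j := congrArg (· ++ entB ((q :: r :: t).getLast hne)) (join_comma (q :: r :: t).dropLast p " with")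
    rw [← String.toList_inj]
    have j2 := congrArg String.toList j
    simp only [String.toList_append, commaCat, List.map_cons] at j2 ⊢
    simp at j2 ⊢
    rw [j2]

-- ===== VERDICT (by name: the statement is the Claim_ definition above) =====
theorem get_extra_log_content_spec : Claim_equal_get_extra_log_content := by
  unfold Claim_equal_get_extra_log_content
  intro cd _
  unfold Spec_get_extra_log_content
  have hnd : (PySem.Dict.ofList cd).keys.Nodup := PySem.Dict.nodup_keys_ofList cd
  exact main_items (PySem.Dict.ofList cd) (fun p hp =>
    PySem.Dict.getD_of_get?_eq_some _ _ (PySem.Dict.get?_of_mem_items _ hp hnd))
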